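-- pv_equiv track=rewrite | github.com/OmarImamverdiyev/N-Queens | nqueens/ac3.py | revise
-- ===== SOURCE A (Python) =====
-- def _value_has_support(value_i: int, domain_j: set[int], row_distance: int) -> bool:
--     """
--     Fast support check for N-Queens arc constraints.
--
--     For fixed rows `xi` and `xj`, a value `value_i` is incompatible with at most
--     three values in `domain_j`: same column and two diagonals.
--     """
--     if not domain_j:
--         return False
--
--     # At most 3 values can be forbidden; larger domains must contain support.
--     if len(domain_j) > 3:
--         return True
--
--     banned_same = value_i
--     banned_diag_up = value_i + row_distance
--     banned_diag_down = value_i - row_distance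
--
--     for value_j in domain_j:
--         if value_j != banned_same and value_j != banned_diag_up and value_j != banned_diag_down:
--             return True
--
--     return False
--
-- def revise(domains: list[set[int]], xi: int, xj: int) -> bool:
--     """
--     Remove unsupported values from domain(xi) with respect to xj.
--
--     A value in xi is removed if there is no compatible value in xj.
--     Returns True when at least one value is removed.
--     """
--     domain_i = domains[xi]
--     domain_j = domains[xj]
--     row_distance = abs(xi - xj)
--
--     to_remove = [
--         value_i for value_i in domain_i
--         if not _value_has_support(value_i, domain_j, row_distance)
--     ]
--     if not to_remove:
--         return False
--
--     domain_i.difference_update(to_remove)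
--     return True
-- ===== SOURCE B (Python) =====
-- def revise(domains, xi, xj):
--     """AC-3 revise by constraint inversion: instead of testing each value of
--     domain(xi) against domain(xj), compute once the (at most 3) columns that
--     could possibly be unsupported -- an unsupported v needs domain_j subset of
--     {v, v+d, v-d}, i.e. v in {w, w-d, w+d} for EVERY w in domain_j -- by
--     intersecting these inverted trios over domain_j, then intersect with
--     domain_i.  One pass over domain_j, one over domain_i."""
--     domain_i = domains[xi]
--     domain_j = domains[xj]
--     d = abs(xi - xj)
--     if not domain_j:
--         unsupported = set(domain_i)
--     else:
--         candidates = None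
--         for w in domain_j:
--             trio = {w, w - d, w + d}
--             candidates = trio if candidates is None else candidates & trio
--         unsupported = {v for v in domain_i if v in candidates}
--     if not unsupported:
--         return False
--     domain_i.difference_update(unsupported)
--     return True
-- ===== Notes on version B (the rewrite author's own statement) =====
-- stated objective: alternative
-- what changed: B inverts the support test: instead of checking each value of domain_i against domain_j (with A's len>3 pigeonhole shortcut and early-exit scan), it intersects the inverted trios {w, w-d, w+d} over all w in domain_j once, leaving at most 3 candidate unsupported columns, then intersects those with domain_i; one pass over each set.
import Mathlib
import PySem

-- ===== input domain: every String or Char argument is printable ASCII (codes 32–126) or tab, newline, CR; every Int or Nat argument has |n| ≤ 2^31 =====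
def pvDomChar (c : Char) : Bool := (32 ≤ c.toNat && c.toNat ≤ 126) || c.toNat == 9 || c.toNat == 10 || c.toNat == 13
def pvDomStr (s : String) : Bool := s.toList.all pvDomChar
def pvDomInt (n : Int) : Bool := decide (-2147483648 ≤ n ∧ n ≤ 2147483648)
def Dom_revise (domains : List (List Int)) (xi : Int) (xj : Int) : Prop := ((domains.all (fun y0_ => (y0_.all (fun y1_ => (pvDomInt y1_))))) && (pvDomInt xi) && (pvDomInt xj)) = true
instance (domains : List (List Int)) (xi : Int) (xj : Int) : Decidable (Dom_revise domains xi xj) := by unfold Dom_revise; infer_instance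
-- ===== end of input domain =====

-- B inverts the constraint: instead of testing every value of domain(xi) against domain(xj),
-- it intersects the inverted trios {w, w-d, w+d} over domain(xj) once (≤ 3 candidate columns
-- survive) and intersects the result with domain(xi).
-- A mutates domains[xi] in place (difference_update); B performs the same mutation, and the
-- equivalence proved here is about the RETURN value only.

-- ===== PORT A =====
-- the 'for value_j in domain_j: if … return True' loop of _value_has_support
def supportLoop (a b c : Int) : List Int → Bool
  | [] => false
  | w :: ws => if w ≠ a ∧ w ≠ b ∧ w ≠ c then true else supportLoop a b c ws

def valueHasSupport (value_i : Int) (domain_j : List Int) (row_distance : Int) : Bool :=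
  if domain_j.isEmpty then false
  else if 3 < domain_j.length then true
  else supportLoop value_i (value_i + row_distance) (value_i - row_distance) domain_j

def revise (domains : List (List Int)) (xi : Int) (xj : Int) : Bool :=
  let domain_i := (PySem.List.pyGet? domains xi).getD []   -- IndexError excluded by Pre_
  let domain_j := (PySem.List.pyGet? domains xj).getD []
  let rowDistance := |xi - xj|
  let toRemove := domain_i.filter (fun v => !valueHasSupport v domain_j rowDistance)
  if toRemove.isEmpty then false else true

-- ===== PORT B =====
-- the 'for w in domain_j: trio = {w, w-d, w+d}; candidates = trio if … else candidates & trio' loop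
def candidatesLoop (d : Int) (domain_j : List Int) : Option (PySem.Set Int) :=
  domain_j.foldl
    (fun acc w =>
      let trio : PySem.Set Int := PySem.Set.ofList [w, w - d, w + d]
      some (match acc with
            | none => trio
            | some c => PySem.Set.inter c trio))
    none

def revise_alt (domains : List (List Int)) (xi : Int) (xj : Int) : Bool :=
  let domain_i := (PySem.List.pyGet? domains xi).getD []   -- IndexError excluded by Pre_
  let domain_j := (PySem.List.pyGet? domains xj).getD []
  let d := |xi - xj|
  let unsupported : List Int :=
    if domain_j.isEmpty then PySem.Set.ofList domain_i
    else domain_i.filter (fun v =>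
      PySem.Set.contains ((candidatesLoop d domain_j).getD []) v)
  if unsupported.isEmpty then false else true

-- ===== PRECONDITION & SPEC =====
-- Pre_ requires both indices in Python range (otherwise A raises IndexError) and every inner
-- list to hold distinct elements — the inner lists represent Python sets under the type
-- convention, so duplicates are unrepresentable inputs, not inputs A returns on.
def Pre_revise (domains : List (List Int)) (xi : Int) (xj : Int) : Prop :=
  PySem.Raise.InRange domains.length xi ∧ PySem.Raise.InRange domains.length xj ∧
  ∀ l ∈ domains, l.Nodup
instance (domains : List (List Int)) (xi : Int) (xj : Int) : Decidable (Pre_revise domains xi xj) := by unfold Pre_revise; infer_instance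
def pvWitness_revise : List (List Int) × Int × Int := ([[0, 1, 2], [1]], 0, 1)

def Spec_revise (domains : List (List Int)) (xi : Int) (xj : Int) (out : Bool) : Prop := out = revise_alt domains xi xj
instance (domains : List (List Int)) (xi : Int) (xj : Int) (out : Bool) : Decidable (Spec_revise domains xi xj out) := by unfold Spec_revise; infer_instance

-- ===== CLAIM (what is proved, stated in full; the proofs are below) =====
def Claim_equal_revise : Prop := ∀ (domains : List (List Int)) (xi : Int) (xj : Int), Dom_revise domains xi xj → Pre_revise domains xi xj → Spec_revise domains xi xj (revise domains xi xj)

-- ===== LEMMAS AND PROOFS =====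

-- the early-exit scan is List.any of the un-banned predicate
theorem supportLoop_eq_any (a b c : Int) (l : List Int) :
    supportLoop a b c l = l.any (fun w => !(w == a || w == b || w == c)) := by
  induction l with
  | nil => rfl
  | cons w ws ih =>
    simp only [supportLoop, List.any_cons, ih]
    by_cases h : w ≠ a ∧ w ≠ b ∧ w ≠ c
    · simp [h.1, h.2.1, h.2.2]
    · push Not at h
      by_cases h1 : w = a
      · simp [h1]
      by_cases h2 : w = b
      · simp [h2]
      · simp [h h1 h2]

-- pigeonhole: a nodup list longer than 3 cannot be contained in a 3-element banned set
theorem exists_unbanned (l : List Int) (hn : l.Nodup) (hl : 3 < l.length) (a b c : Int) :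
    ∃ w ∈ l, w ≠ a ∧ w ≠ b ∧ w ≠ c := by
  by_contra h
  push Not at h
  have hsub : l.toFinset ⊆ ({a, b, c} : Finset Int) := by
    intro x hx
    have hxl := List.mem_toFinset.mp hx
    by_cases h1 : x = a
    · simp [h1]
    by_cases h2 : x = b
    · simp [h2]
    · simp [h x hxl h1 h2]
  have hcard : l.toFinset.card ≤ ({a, b, c} : Finset Int).card := Finset.card_le_card hsub
  have h3 : ({a, b, c} : Finset Int).card ≤ 3 := by
    have hA := Finset.card_insert_le a ({b, c} : Finset Int)
    have hB := Finset.card_insert_le b ({c} : Finset Int)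
    simp only [Finset.card_singleton] at hB
    omega
  rw [List.toFinset_card_of_nodup hn] at hcard
  omega

-- A's support test, characterised: on a nodup nonempty domain_j, support fails exactly
-- when every w of domain_j is one of the three banned columns of v
theorem valueHasSupport_false_iff (v d : Int) (dj : List Int) (hn : dj.Nodup) (hne : dj ≠ []) :
    valueHasSupport v dj d = false ↔ ∀ w ∈ dj, w = v ∨ w = v + d ∨ w = v - d := by
  unfold valueHasSupport
  simp only [List.isEmpty_iff, hne, if_false]
  by_cases hl : 3 < dj.length
  · simp only [hl, if_true]
    constructor
    · intro h; exact absurd h (by simp)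
    · intro h
      obtain ⟨w, hw, h1, h2, h3⟩ := exists_unbanned dj hn hl v (v + d) (v - d)
      rcases h w hw with h' | h' | h' <;> [exact absurd h' h1; exact absurd h' h2; exact absurd h' h3]
  · simp only [hl, if_false, supportLoop_eq_any, List.any_eq_false]
    constructor
    · intro h w hw
      have := h w hw
      by_cases h1 : w = v
      · exact Or.inl h1
      by_cases h2 : w = v + d
      · exact Or.inr (Or.inl h2)
      by_cases h3 : w = v - d
      · exact Or.inr (Or.inr h3)
      · simp [h1, h2, h3] at this
    · intro h w hw
      rcases h w hw with h' | h' | h' <;> simp [h']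

-- B's candidate fold, characterised on a some-accumulator
theorem candidatesLoop_some (d : Int) (ws : List Int) (c : PySem.Set Int) :
    ∃ c', ws.foldl
        (fun acc w =>
          let trio : PySem.Set Int := PySem.Set.ofList [w, w - d, w + d]
          some (match acc with
                | none => trio
                | some c => PySem.Set.inter c trio))
        (some c) = some c' ∧
      ∀ v, v ∈ c' ↔ v ∈ c ∧ ∀ w ∈ ws, (v = w ∨ v = w - d ∨ v = w + d) := by
  induction ws generalizing c with
  | nil => exact ⟨c, rfl, by simp⟩
  | cons w ws ih =>
    obtain ⟨c', hc', hmem⟩ := ih (PySem.Set.inter c (PySem.Set.ofList [w, w - d, w + d]))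
    refine ⟨c', hc', fun v => ?_⟩
    rw [hmem v, PySem.Set.mem_inter, PySem.Set.mem_ofList]
    simp only [List.mem_cons, List.not_mem_nil, or_false]
    constructor
    · rintro ⟨⟨hc, htrio⟩, hrest⟩
      refine ⟨hc, fun u hu => ?_⟩
      rcases hu with hu | hu
      · subst hu; exact htrio
      · exact hrest u hu
    · rintro ⟨hc, hall⟩
      exact ⟨⟨hc, hall w (Or.inl rfl)⟩,
             fun u hu => hall u (Or.inr hu)⟩

-- B's candidates on a nonempty domain_j: membership is the universal banned condition
theorem mem_candidatesLoop (d : Int) (dj : List Int) (hne : dj ≠ []) (v : Int) :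
    PySem.Set.contains ((candidatesLoop d dj).getD []) v
      = decide (∀ w ∈ dj, w = v ∨ w = v + d ∨ w = v - d) := by
  cases dj with
  | nil => exact absurd rfl hne
  | cons w ws =>
    unfold candidatesLoop
    simp only [List.foldl_cons]
    obtain ⟨c', hc', hmem⟩ := candidatesLoop_some d ws (PySem.Set.ofList [w, w - d, w + d])
    rw [hc']
    simp only [Option.getD_some]
    have hiff : v ∈ c' ↔ ∀ u ∈ w :: ws, u = v ∨ u = v + d ∨ u = v - d := by
      rw [hmem v, PySem.Set.mem_ofList]
      simp only [List.mem_cons, List.not_mem_nil, or_false]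
      constructor
      · rintro ⟨h1, h2⟩ u hu
        rcases hu with hu | hu
        · subst hu; omega
        · rcases h2 u hu with h' | h' | h' <;> omega
      · intro hall
        refine ⟨?_, fun u hu => ?_⟩
        · rcases hall w (Or.inl rfl) with h' | h' | h' <;> omega
        · rcases hall u (Or.inr hu) with h' | h' | h' <;> omega
    by_cases h : ∀ u ∈ w :: ws, u = v ∨ u = v + d ∨ u = v - d
    · rw [(PySem.Set.contains_iff c' v).mpr (hiff.mpr h), decide_eq_true h]
    · have hc : PySem.Set.contains c' v = false := by
        by_contra hcc
        exact h (hiff.mp ((PySem.Set.contains_iff c' v).mp (by simpa using hcc)))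
      rw [hc, decide_eq_false h]

-- ===== VERDICT (by name: the statement is the Claim_ definition above) =====
theorem revise_spec : Claim_equal_revise := by
  intro domains xi xj _ hpre
  obtain ⟨hi, hj, hnodup⟩ := hpre
  unfold Spec_revise revise revise_alt
  obtain ⟨di, hdi⟩ : ∃ di, PySem.List.pyGet? domains xi = some di := by
    cases h : PySem.List.pyGet? domains xi with
    | none => exact absurd hi (by rw [← PySem.List.pyGet?_eq_none_iff, h])
    | some d => exact ⟨d, rfl⟩
  obtain ⟨dj, hdj⟩ : ∃ dj, PySem.List.pyGet? domains xj = some dj := by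
    cases h : PySem.List.pyGet? domains xj with
    | none => exact absurd hj (by rw [← PySem.List.pyGet?_eq_none_iff, h])
    | some d => exact ⟨d, rfl⟩
  have hdin : di.Nodup := hnodup di (PySem.List.mem_of_pyGet?_eq_some domains hdi)
  have hdjn : dj.Nodup := hnodup dj (PySem.List.mem_of_pyGet?_eq_some domains hdj)
  simp only [hdi, hdj, Option.getD_some]
  by_cases hne : dj = []
  · subst hne
    have hA : di.filter (fun v => !valueHasSupport v [] |xi - xj|) = di := by
      simp [valueHasSupport]
    rw [hA]
    rw [PySem.Set.ofList_eq_self_of_nodup di hdin]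
    simp
  · simp only [List.isEmpty_iff, hne, if_false]
    have hfilt : di.filter (fun v => !valueHasSupport v dj |xi - xj|)
        = di.filter (fun v =>
            PySem.Set.contains ((candidatesLoop |xi - xj| dj).getD []) v) := by
      apply List.filter_congr
      intro v _
      rw [mem_candidatesLoop |xi - xj| dj hne v]
      rcases h : valueHasSupport v dj |xi - xj| with _ | _
      · rw [(valueHasSupport_false_iff v |xi - xj| dj hdjn hne).mp h |> decide_eq_true]; rfl
      · have : ¬ ∀ w ∈ dj, w = v ∨ w = v + |xi - xj| ∨ w = v - |xi - xj| := by
          intro hall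
          rw [(valueHasSupport_false_iff v |xi - xj| dj hdjn hne).mpr hall] at h
          cases h
        simp [this]
    rw [hfilt]
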